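-- pv_equiv track=rewrite | github.com/Daharen/Opening_Trainer | src/opening_trainer/review/router.py | _self_run_max
-- ===== SOURCE A (Python) =====
-- REVIEW_CATEGORIES = ('D', 'H80', 'H60', 'H40', 'H20', 'B', 'E')
--
-- def _self_run_max(tokens: list[str]) -> dict[str, int]:
--     n = len(tokens)
--     doubled = tokens + tokens
--     out = {k: 0 for k in ('C', *REVIEW_CATEGORIES)}
--     if n == 0:
--         return out
--     run_cat = doubled[0]
--     run_len = 1
--     for token in doubled[1:]:
--         if token == run_cat:
--             run_len += 1
--         else:
--             out[run_cat] = max(out[run_cat], min(run_len, n))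
--             run_cat = token
--             run_len = 1
--     out[run_cat] = max(out[run_cat], min(run_len, n))
--     return out
-- ===== SOURCE B (Python) =====
-- REVIEW_CATEGORIES = ('D', 'H80', 'H60', 'H40', 'H20', 'B', 'E')
--
-- def _self_run_max(tokens: list[str]) -> dict[str, int]:
--     out = {k: 0 for k in ('C', *REVIEW_CATEGORIES)}
--     runs = []
--     for t in tokens:
--         if runs and runs[-1][0] == t:
--             runs[-1] = (t, runs[-1][1] + 1)
--         else:
--             runs.append((t, 1))
--     for cat, length in runs:
--         out[cat] = max(out[cat], length)
--     if len(runs) > 1 and runs[0][0] == runs[-1][0]: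
--         c0, l0 = runs[0]
--         _, ll = runs[-1]
--         out[c0] = max(out[c0], l0 + ll)
--     return out
-- ===== Notes on version B (the rewrite author's own statement) =====
-- stated objective: alternative
-- what changed: B materialises the (category, length) runs of the un-doubled list in one pass and handles the circular boundary with one explicit first-run/last-run merge candidate, instead of A's scan over the doubled list with clamped inline dict updates.
-- outside the precondition, e.g. on _self_run_max(['X']): A raises KeyError, B raises KeyError
import Mathlib
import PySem

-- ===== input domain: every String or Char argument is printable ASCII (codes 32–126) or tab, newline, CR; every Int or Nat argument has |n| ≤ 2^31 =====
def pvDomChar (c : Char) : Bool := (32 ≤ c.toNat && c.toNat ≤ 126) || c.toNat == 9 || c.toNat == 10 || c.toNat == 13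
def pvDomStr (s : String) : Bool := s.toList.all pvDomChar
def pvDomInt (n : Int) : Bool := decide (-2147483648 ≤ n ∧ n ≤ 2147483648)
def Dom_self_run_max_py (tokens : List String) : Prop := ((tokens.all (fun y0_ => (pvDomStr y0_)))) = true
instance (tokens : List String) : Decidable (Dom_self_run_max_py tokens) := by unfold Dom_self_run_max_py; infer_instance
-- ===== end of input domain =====

-- B computes the (category, length) runs of the un-doubled list in one pass and handles the
-- circular boundary by one explicit first-run/last-run merge, instead of A's doubled-list scan
-- with clamped inline dict updates; objective: alternative (same O(n) cost, no doubling).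

-- ===== PORT A =====
def pvRC : List String := ["D", "H80", "H60", "H40", "H20", "B", "E"]

-- out[run_cat] = max(out[run_cat], min(run_len, n)); Python raises KeyError when run_cat is not a
-- key — those inputs are excluded by Pre_; under Pre_ the key is present and getD 0 is exact.
def aSet (n : Int) (d : PySem.Dict String Int) (c : String) (k : Int) : PySem.Dict String Int :=
  d.insert c (max (d.getD c 0) (min k n))

def stepA (n : Int) (st : PySem.Dict String Int × String × Int) (token : String) :
    PySem.Dict String Int × String × Int :=
  if token == st.2.1 then (st.1, st.2.1, st.2.2 + 1)
  else (aSet n st.1 st.2.1 st.2.2, token, 1)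

def self_run_max_py (tokens : List String) : List (String × Int) :=
  let n : Int := tokens.length
  let doubled := tokens ++ tokens
  let out : PySem.Dict String Int :=
    PySem.Dict.ofList (("C" :: pvRC).map (fun k => (k, (0 : Int))))
  match doubled with
  | [] => out.items
  | d0 :: rest =>
      let st := rest.foldl (stepA n) (out, d0, 1)
      (aSet n st.1 st.2.1 st.2.2).items

-- ===== PORT B =====
def bRunStep (runs : List (String × Int)) (t : String) : List (String × Int) :=
  match runs.getLast? with
  | some (c, k) => if c == t then runs.dropLast ++ [(t, k + 1)] else runs ++ [(t, 1)]
  | none => runs ++ [(t, 1)]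

def self_run_max_py_alt (tokens : List String) : List (String × Int) :=
  let out : PySem.Dict String Int :=
    PySem.Dict.ofList (("C" :: pvRC).map (fun k => (k, (0 : Int))))
  let runs := tokens.foldl bRunStep []
  let out := runs.foldl (fun d p => d.insert p.1 (max (d.getD p.1 0) p.2)) out
  match runs.head?, runs.getLast? with
  | some (c0, l0), some (_, ll) =>
      if 1 < runs.length ∧ c0 = (runs.getLast?.map Prod.fst).getD c0 then
        (out.insert c0 (max (out.getD c0 0) (l0 + ll))).items
      else out.items
  | _, _ => out.items

-- ===== PRECONDITION & SPEC =====
-- Pre_ excludes token lists containing a string that is not one of the eight category keys: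
-- on those both Pythons raise KeyError (out[run_cat] on a missing key).
def Pre_self_run_max_py (tokens : List String) : Prop :=
  ∀ t ∈ tokens, t ∈ ("C" :: pvRC)
instance (tokens : List String) : Decidable (Pre_self_run_max_py tokens) := by
  unfold Pre_self_run_max_py; infer_instance

def pvWitness_self_run_max_py : List String := ["D", "C", "C", "D"]

def Spec_self_run_max_py (tokens : List String) (out : List (String × Int)) : Prop :=
  out = self_run_max_py_alt tokens
instance (tokens : List String) (out : List (String × Int)) :
    Decidable (Spec_self_run_max_py tokens out) := by unfold Spec_self_run_max_py; infer_instance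

-- ===== CLAIM (what is proved, stated in full; the proofs are below) =====
def Claim_equal_self_run_max_py : Prop :=
  ∀ (tokens : List String), Dom_self_run_max_py tokens → Pre_self_run_max_py tokens →
    Spec_self_run_max_py tokens (self_run_max_py tokens)

-- ===== LEMMAS AND PROOFS =====

-- the (category, length) runs of a list whose current open run is (c, k)
def runsFrom (c : String) (k : Int) : List String → List (String × Int)
  | [] => [(c, k)]
  | t :: ts => if t = c then runsFrom c (k + 1) ts else (c, k) :: runsFrom t 1 ts

theorem runsFrom_ne_nil (l : List String) (c : String) (k : Int) : runsFrom c k l ≠ [] := by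
  induction l generalizing c k with
  | nil => simp [runsFrom]
  | cons t ts ih =>
      by_cases h : t = c
      · simpa [runsFrom, h] using ih c (k + 1)
      · simp [runsFrom, h]

theorem bRunStep_spec (l : List String) (rs : List (String × Int)) (c : String) (k : Int) :
    List.foldl bRunStep (rs ++ [(c, k)]) l = rs ++ runsFrom c k l := by
  induction l generalizing rs c k with
  | nil => simp [runsFrom]
  | cons t ts ih =>
      by_cases h : t = c
      · have : bRunStep (rs ++ [(c, k)]) t = rs ++ [(c, k + 1)] := by
          simp [bRunStep, h]
        simp only [List.foldl_cons, this, runsFrom, if_pos h]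
        exact ih rs c (k + 1)
      · have hb : bRunStep (rs ++ [(c, k)]) t = (rs ++ [(c, k)]) ++ [(t, 1)] := by
          have : ¬ (c == t) = true := by simpa [beq_iff_eq] using fun hh => h hh.symm
          simp [bRunStep, this]
        simp only [List.foldl_cons, hb, runsFrom, if_neg h]
        rw [List.append_assoc] at hb ⊢
        have := ih (rs ++ [(c, k)]) t 1
        rw [List.append_assoc] at this
        simpa using this

theorem b_runs_eq (t : String) (ts : List String) :
    List.foldl bRunStep [] (t :: ts) = runsFrom t 1 ts := by
  have h0 : bRunStep [] t = [] ++ [(t, 1)] := by simp [bRunStep]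
  simpa using (by
    simpa [h0] using bRunStep_spec ts [] t 1 : List.foldl bRunStep (bRunStep [] t) ts = runsFrom t 1 ts)

theorem a_loop_spec (n : Int) (l : List String) (d : PySem.Dict String Int) (c : String) (k : Int) :
    (fun st => aSet n st.1 st.2.1 st.2.2) (List.foldl (stepA n) (d, c, k) l)
      = List.foldl (fun d p => aSet n d p.1 p.2) d (runsFrom c k l) := by
  induction l generalizing d c k with
  | nil => simp [runsFrom]
  | cons t ts ih =>
      by_cases h : t = c
      · have hs : stepA n (d, c, k) t = (d, c, k + 1) := by simp [stepA, h]
        simp only [List.foldl_cons, hs, runsFrom, if_pos h]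
        exact ih d c (k + 1)
      · have hs : stepA n (d, c, k) t = (aSet n d c k, t, 1) := by simp [stepA, h]
        simp only [List.foldl_cons, hs, runsFrom, if_neg h, List.foldl_cons]
        exact ih (aSet n d c k) t 1

theorem runsFrom_shift (l : List String) (c : String) (k j m : Int) (rest : List (String × Int))
    (h : runsFrom c k l = (c, m) :: rest) : runsFrom c (k + j) l = (c, m + j) :: rest := by
  induction l generalizing c k m rest with
  | nil =>
      simp only [runsFrom, List.cons.injEq, Prod.mk.injEq, true_and] at h
      obtain ⟨hk, hr⟩ := h
      subst hk
      subst hr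
      simp [runsFrom]
  | cons t ts ih =>
      by_cases ht : t = c
      · simp only [runsFrom, if_pos ht] at h ⊢
        have := ih c (k + 1) m rest h
        have e : k + j + 1 = k + 1 + j := by ring
        rw [e]
        exact this
      · simp only [runsFrom, if_neg ht] at h ⊢
        have h1 := (List.cons.injEq _ _ _ _).mp h
        have hk : k = m := by
          have := congrArg Prod.snd h1.1
          simpa using this
        subst hk
        simp [h1.2]

theorem runsFrom_cons_head (l : List String) (c : String) (k : Int) :
    ∃ m rest, runsFrom c k l = (c, m) :: rest ∧ k ≤ m := by
  induction l generalizing k with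
  | nil => exact ⟨k, [], by simp [runsFrom], le_refl _⟩
  | cons t ts ih =>
      by_cases ht : t = c
      · obtain ⟨m, rest, hm, hle⟩ := ih (k + 1)
        exact ⟨m, rest, by simp [runsFrom, ht, hm], by omega⟩
      · exact ⟨k, runsFrom t 1 ts, by simp [runsFrom, ht], le_refl _⟩

theorem runsFrom_append (l1 : List String) (c : String) (k : Int) (t : String) (ts : List String)
    (rs : List (String × Int)) (cl : String) (kl : Int)
    (h : runsFrom c k l1 = rs ++ [(cl, kl)]) :
    runsFrom c k (l1 ++ t :: ts)
      = if t = cl then rs ++ runsFrom cl (kl + 1) ts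
        else (rs ++ [(cl, kl)]) ++ runsFrom t 1 ts := by
  induction l1 generalizing c k rs cl kl with
  | nil =>
      simp only [runsFrom] at h
      have hrs : rs = [] := by
        cases rs with
        | nil => rfl
        | cons p ps =>
            exfalso
            have := congrArg List.length h
            simp at this
      subst hrs
      simp only [List.nil_append] at h ⊢
      have hc : c = cl ∧ k = kl := by
        have h1 := (List.cons.injEq _ _ _ _).mp h |>.1
        exact ⟨congrArg Prod.fst h1, congrArg Prod.snd h1⟩
      obtain ⟨hc1, hc2⟩ := hc
      subst hc1; subst hc2
      by_cases ht : t = c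
      · simp [runsFrom, ht]
      · simp [runsFrom, ht]
  | cons a l1' ih =>
      by_cases ha : a = c
      · simp only [List.cons_append, runsFrom, if_pos ha] at h ⊢
        exact ih c (k + 1) rs cl kl h
      · simp only [runsFrom, if_neg ha, List.cons_append] at h ⊢
        cases rs with
        | nil =>
            exfalso
            have h2 := (List.cons.injEq _ _ _ _).mp h |>.2
            exact runsFrom_ne_nil l1' a 1 h2
        | cons p ps =>
            have h1 := (List.cons.injEq _ _ _ _).mp h
            have hps : runsFrom a 1 l1' = ps ++ [(cl, kl)] := h1.2
            have := ih a 1 ps cl kl hps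
            rw [this, ← h1.1]
            by_cases htc : t = cl <;> simp [htc]

theorem runsFrom_sum (l : List String) (c : String) (k : Int) :
    ((runsFrom c k l).map Prod.snd).sum = k + l.length := by
  induction l generalizing c k with
  | nil => simp [runsFrom]
  | cons t ts ih =>
      by_cases ht : t = c
      · simp only [runsFrom, if_pos ht]
        rw [ih c (k + 1)]
        simp only [List.length_cons]
        push_cast
        ring
      · simp only [runsFrom, if_neg ht, List.map_cons, List.sum_cons]
        rw [ih t 1]
        simp only [List.length_cons]
        push_cast
        ring

theorem runsFrom_pos (l : List String) (c : String) (k : Int) (hk : 1 ≤ k) :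
    ∀ p ∈ runsFrom c k l, 1 ≤ p.2 := by
  induction l generalizing c k with
  | nil =>
      intro p hp
      simp only [runsFrom, List.mem_singleton] at hp
      subst hp; simpa using hk
  | cons t ts ih =>
      intro p hp
      by_cases ht : t = c
      · simp only [runsFrom, if_pos ht] at hp
        exact ih c (k + 1) (by omega) p hp
      · simp only [runsFrom, if_neg ht, List.mem_cons] at hp
        rcases hp with hp | hp
        · subst hp; simpa using hk
        · exact ih t 1 (le_refl _) p hp

-- max of f over the entries of rs with category x, starting from a
def runMax (x : String) (a : Int) (rs : List (String × Int)) (f : String × Int → Int) : Int :=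
  ((rs.filter (fun p => p.1 = x)).map f).foldl max a

theorem le_foldl_max (l : List Int) (a : Int) : a ≤ l.foldl max a := by
  induction l generalizing a with
  | nil => simp
  | cons x xs ih => exact le_trans (le_max_left a x) (ih (max a x))

theorem mem_le_foldl_max (l : List Int) (a x : Int) (h : x ∈ l) : x ≤ l.foldl max a := by
  induction l generalizing a with
  | nil => simp at h
  | cons y ys ih =>
      rcases List.mem_cons.mp h with h | h
      · subst h
        exact le_trans (le_max_right a x) (le_foldl_max ys (max a x))
      · exact ih (max a y) h

theorem foldl_max_le (l : List Int) (a b : Int) (ha : a ≤ b) (h : ∀ x ∈ l, x ≤ b) :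
    l.foldl max a ≤ b := by
  induction l generalizing a with
  | nil => simpa using ha
  | cons x xs ih =>
      exact ih (max a x) (max_le ha (h x (by simp))) (fun y hy => h y (by simp [hy]))

theorem le_runMax_self (x : String) (a : Int) (rs : List (String × Int)) (f : String × Int → Int) :
    a ≤ runMax x a rs f := by
  exact le_foldl_max _ _

theorem le_runMax (x : String) (a : Int) (rs : List (String × Int)) (f : String × Int → Int)
    (p : String × Int) (hp : p ∈ rs) (hx : p.1 = x) : f p ≤ runMax x a rs f := by
  apply mem_le_foldl_max
  exact List.mem_map_of_mem (List.mem_filter.mpr ⟨hp, by simp [hx]⟩)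

theorem runMax_le (x : String) (a b : Int) (rs : List (String × Int)) (f : String × Int → Int)
    (ha : a ≤ b) (h : ∀ p ∈ rs, p.1 = x → f p ≤ b) : runMax x a rs f ≤ b := by
  apply foldl_max_le _ _ _ ha
  intro y hy
  obtain ⟨p, hp, rfl⟩ := List.mem_map.mp hy
  obtain ⟨hpm, hpx⟩ := List.mem_filter.mp hp
  exact h p hpm (by simpa using hpx)

theorem getD_foldl_ins (f : String × Int → Int) (rs : List (String × Int))
    (d : PySem.Dict String Int) (x : String) :
    (rs.foldl (fun d p => d.insert p.1 (max (d.getD p.1 0) (f p))) d).getD x 0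
      = runMax x (d.getD x 0) rs f := by
  induction rs generalizing d with
  | nil => simp [runMax]
  | cons p ps ih =>
      simp only [List.foldl_cons]
      rw [ih]
      by_cases hx : p.1 = x
      · subst hx
        simp [runMax, PySem.Dict.getD_insert_self]
      · have : (d.insert p.1 (max (d.getD p.1 0) (f p))).getD x 0 = d.getD x 0 :=
          PySem.Dict.getD_insert_of_ne _ _ _ (fun hh => hx hh.symm)
        rw [this]
        simp [runMax, hx]

theorem update_absorb (s : List String) (l : List String) (h : ∀ x ∈ l, x ∈ s) :
    PySem.Set.update s l = s := by
  induction l generalizing s with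
  | nil => simp [PySem.Set.update]
  | cons x xs ih =>
      rw [PySem.Set.update_cons, PySem.Set.add_of_mem (h x (by simp)), ih]
      intro y hy
      exact h y (by simp [hy])

def out0 : PySem.Dict String Int :=
  PySem.Dict.ofList (("C" :: pvRC).map (fun k => (k, (0 : Int))))

theorem items_ext (d e : PySem.Dict String Int) (hd : d.keys.Nodup) (he : e.keys.Nodup)
    (hk : d.keys = e.keys) (hv : ∀ x ∈ d.keys, d.getD x 0 = e.getD x 0) : d.items = e.items := by
  rw [PySem.Dict.items_eq_map_keys d hd 0, PySem.Dict.items_eq_map_keys e he 0, ← hk]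
  exact List.map_congr_left (fun x hx => by rw [hv x hx])

theorem foldA_getD (n : Int) (R : List (String × Int)) (d : PySem.Dict String Int) (x : String) :
    (List.foldl (fun d p => aSet n d p.1 p.2) d R).getD x 0
      = runMax x (d.getD x 0) R (fun p => min p.2 n) :=
  getD_foldl_ins (fun p => min p.2 n) R d x

theorem foldB_getD (R : List (String × Int)) (d : PySem.Dict String Int) (x : String) :
    (List.foldl (fun d p => d.insert p.1 (max (d.getD p.1 0) p.2)) d R).getD x 0
      = runMax x (d.getD x 0) R Prod.snd :=
  getD_foldl_ins Prod.snd R d x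

theorem foldA_keys (n : Int) (R : List (String × Int)) (d : PySem.Dict String Int) :
    (List.foldl (fun d p => aSet n d p.1 p.2) d R).keys
      = PySem.Set.update d.keys (R.map Prod.fst) :=
  PySem.Dict.keys_foldl_insert_key R Prod.fst (fun d p => max (d.getD p.1 0) (min p.2 n)) d

theorem foldB_keys (R : List (String × Int)) (d : PySem.Dict String Int) :
    (List.foldl (fun d p => d.insert p.1 (max (d.getD p.1 0) p.2)) d R).keys
      = PySem.Set.update d.keys (R.map Prod.fst) :=
  PySem.Dict.keys_foldl_insert_key R Prod.fst (fun d p => max (d.getD p.1 0) p.2) d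

theorem foldA_nodup (n : Int) (R : List (String × Int)) (d : PySem.Dict String Int)
    (h : d.keys.Nodup) : (List.foldl (fun d p => aSet n d p.1 p.2) d R).keys.Nodup :=
  PySem.Dict.nodup_keys_foldl_insert_key R Prod.fst (fun d p => max (d.getD p.1 0) (min p.2 n)) d h

theorem foldB_nodup (R : List (String × Int)) (d : PySem.Dict String Int)
    (h : d.keys.Nodup) :
    (List.foldl (fun d p => d.insert p.1 (max (d.getD p.1 0) p.2)) d R).keys.Nodup :=
  PySem.Dict.nodup_keys_foldl_insert_key R Prod.fst (fun d p => max (d.getD p.1 0) p.2) d h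

theorem out0_nodup : out0.keys.Nodup := by decide

theorem val_double (x : String) (a0 n : Int) (r : List (String × Int))
    (hle : ∀ p ∈ r, p.2 ≤ n) :
    runMax x a0 (r ++ r) (fun p => min p.2 n) = runMax x a0 r Prod.snd := by
  apply le_antisymm
  · apply runMax_le _ _ _ _ _ (le_runMax_self _ _ _ _)
    intro p hp hpx
    rcases List.mem_append.mp hp with hp | hp <;>
      exact le_trans (min_le_left _ _) (le_runMax x a0 r Prod.snd p hp hpx)
  · apply runMax_le _ _ _ _ _ (le_runMax_self _ _ _ _)
    intro p hp hpx
    calc Prod.snd p = min p.2 n := (min_eq_left (hle p hp)).symm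
      _ ≤ _ := le_runMax x a0 (r ++ r) _ p (List.mem_append_left _ hp) hpx

theorem val_merge (x t : String) (k1 kl a0 n : Int) (rs tail r : List (String × Int))
    (hr : r = (t, k1) :: tail) (hsplit : r = rs ++ [(t, kl)])
    (hle : ∀ p ∈ r, p.2 ≤ n) (hkk : k1 + kl ≤ n) (hk1 : 1 ≤ k1) :
    runMax x a0 (rs ++ (t, k1 + kl) :: tail) (fun p => min p.2 n)
      = if x = t then max (runMax x a0 r Prod.snd) (k1 + kl) else runMax x a0 r Prod.snd := by
  have hmem_rs : ∀ p ∈ rs, p ∈ r := fun p hp => by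
    rw [hsplit]; exact List.mem_append_left _ hp
  have hmem_tail : ∀ p ∈ tail, p ∈ r := fun p hp => by
    rw [hr]; exact List.mem_cons_of_mem _ hp
  by_cases hx : x = t
  · subst hx
    rw [if_pos rfl]
    have hRmem : (x, k1 + kl) ∈ rs ++ (x, k1 + kl) :: tail :=
      List.mem_append_right _ (List.mem_cons_self)
    have hcand : k1 + kl ≤ runMax x a0 (rs ++ (x, k1 + kl) :: tail) (fun p => min p.2 n) := by
      have := le_runMax x a0 (rs ++ (x, k1 + kl) :: tail) (fun p => min p.2 n) _ hRmem rfl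
      simpa [min_eq_left hkk] using this
    apply le_antisymm
    · apply runMax_le _ _ _ _ _ (le_trans (le_runMax_self _ _ _ _) (le_max_left _ _))
      intro p hp hpx
      rcases List.mem_append.mp hp with hp | hp
      · exact le_trans (min_le_left _ _)
          (le_trans (le_runMax x a0 r Prod.snd p (hmem_rs p hp) hpx) (le_max_left _ _))
      · rcases List.mem_cons.mp hp with rfl | hp
        · simp [min_eq_left hkk]
        · exact le_trans (min_le_left _ _)
            (le_trans (le_runMax x a0 r Prod.snd p (hmem_tail p hp) hpx) (le_max_left _ _))
    · apply max_le _ hcand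
      apply runMax_le _ _ _ _ _ (le_runMax_self _ _ _ _)
      intro p hp hpx
      have hple := hle p hp
      rw [hsplit] at hp
      rcases List.mem_append.mp hp with hp | hp
      · calc Prod.snd p = min p.2 n := (min_eq_left hple).symm
          _ ≤ _ := le_runMax x a0 _ _ p (List.mem_append_left _ hp) hpx
      · rcases List.mem_singleton.mp hp with rfl
        exact le_trans (by omega : kl ≤ k1 + kl) hcand
  · rw [if_neg hx]
    apply le_antisymm
    · apply runMax_le _ _ _ _ _ (le_runMax_self _ _ _ _)
      intro p hp hpx
      rcases List.mem_append.mp hp with hp | hp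
      · exact le_trans (min_le_left _ _) (le_runMax x a0 r Prod.snd p (hmem_rs p hp) hpx)
      · rcases List.mem_cons.mp hp with rfl | hp
        · exact absurd hpx.symm hx
        · exact le_trans (min_le_left _ _) (le_runMax x a0 r Prod.snd p (hmem_tail p hp) hpx)
    · apply runMax_le _ _ _ _ _ (le_runMax_self _ _ _ _)
      intro p hp hpx
      have hple := hle p hp
      rw [hsplit] at hp
      rcases List.mem_append.mp hp with hp | hp
      · calc Prod.snd p = min p.2 n := (min_eq_left hple).symm
          _ ≤ _ := le_runMax x a0 _ _ p (List.mem_append_left _ hp) hpx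
      · rcases List.mem_singleton.mp hp with rfl
        exact absurd hpx.symm hx

theorem val_single (x t : String) (n a0 : Int) (h0 : 0 ≤ n) :
    runMax x a0 [(t, n + n)] (fun p => min p.2 n) = runMax x a0 [(t, n)] Prod.snd := by
  unfold runMax
  by_cases hx : x = t
  · subst hx
    simp [min_eq_right (by omega : n ≤ n + n)]
  · have : ¬ (t = x) := fun h => hx h.symm
    simp [this]

theorem main_cons (t : String) (ts : List String) :
    self_run_max_py (t :: ts) = self_run_max_py_alt (t :: ts) := by
  have hne := runsFrom_ne_nil ts t 1
  obtain ⟨k1, tail, hr, hk1⟩ := runsFrom_cons_head ts t 1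
  obtain ⟨cl, kl, hlastpair⟩ : ∃ cl kl, (runsFrom t 1 ts).getLast hne = (cl, kl) :=
    ⟨_, _, rfl⟩
  have hsplit : runsFrom t 1 ts = (runsFrom t 1 ts).dropLast ++ [(cl, kl)] := by
    conv_lhs => rw [← List.dropLast_append_getLast hne]
    rw [hlastpair]
  set N : Int := (((t :: ts).length : Nat) : Int) with hN
  have hN0 : N = 1 + (ts.length : Int) := by
    rw [hN]; simp [List.length_cons]; ring
  have hsum : ((runsFrom t 1 ts).map Prod.snd).sum = N := by
    rw [runsFrom_sum, hN0]
  have hpos : ∀ p ∈ runsFrom t 1 ts, 1 ≤ p.2 := runsFrom_pos ts t 1 le_rfl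
  have hle : ∀ p ∈ runsFrom t 1 ts, p.2 ≤ N := by
    intro p hp
    rw [← hsum]
    refine List.single_le_sum ?_ _ (List.mem_map_of_mem hp)
    intro y hy
    obtain ⟨q, hq, rfl⟩ := List.mem_map.mp hy
    exact le_trans zero_le_one (hpos q hq)
  -- reduce port A
  have hA : self_run_max_py (t :: ts)
      = (List.foldl (fun d p => aSet N d p.1 p.2) out0 (runsFrom t 1 (ts ++ t :: ts))).items := by
    have h1 : self_run_max_py (t :: ts)
        = ((fun st => aSet N st.1 st.2.1 st.2.2)
            (List.foldl (stepA N) (out0, t, 1) (ts ++ t :: ts))).items := rfl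
    rw [h1, a_loop_spec]
  -- reduce port B
  have hhead : (runsFrom t 1 ts).head? = some (t, k1) := by rw [hr]; rfl
  have hlast : (runsFrom t 1 ts).getLast? = some (cl, kl) := by
    rw [hsplit]; exact List.getLast?_concat
  have hB : self_run_max_py_alt (t :: ts)
      = (if 1 < (runsFrom t 1 ts).length ∧ t = cl then
           ((List.foldl (fun d p => d.insert p.1 (max (d.getD p.1 0) p.2)) out0
               (runsFrom t 1 ts)).insert t
             (max ((List.foldl (fun d p => d.insert p.1 (max (d.getD p.1 0) p.2)) out0
               (runsFrom t 1 ts)).getD t 0) (k1 + kl))).items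
         else (List.foldl (fun d p => d.insert p.1 (max (d.getD p.1 0) p.2)) out0
               (runsFrom t 1 ts)).items) := by
    simp only [self_run_max_py_alt, b_runs_eq, hhead, hlast, Option.map_some, Option.getD_some]
    rfl
  have hRdef := runsFrom_append ts t 1 t ts (runsFrom t 1 ts).dropLast cl kl hsplit
  by_cases htc : t = cl
  · -- first and last run share the category
    subst htc
    have hshift : runsFrom t (kl + 1) ts = (t, k1 + kl) :: tail := by
      have := runsFrom_shift ts t 1 kl k1 tail hr
      rwa [show (1 : Int) + kl = kl + 1 by ring] at this
    have hR : runsFrom t 1 (ts ++ t :: ts)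
        = (runsFrom t 1 ts).dropLast ++ (t, k1 + kl) :: tail := by
      rw [hRdef, if_pos rfl, hshift]
    by_cases hlen : 1 < (runsFrom t 1 ts).length
    · -- at least two runs: B merges first and last
      have htail_ne : tail ≠ [] := by
        intro h
        rw [hr, h] at hlen
        simp at hlen
      obtain ⟨pp, tl, rfl⟩ : ∃ pp tl, tail = pp :: tl := by
        cases tail with
        | nil => exact absurd rfl htail_ne
        | cons pp tl => exact ⟨pp, tl, rfl⟩
      have hg : (pp :: tl).getLast (List.cons_ne_nil _ _) = (t, kl) := by
        have h1 : ((t, k1) :: pp :: tl).getLast? = some (t, kl) := by rw [← hr]; exact hlast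
        rw [List.getLast?_cons_cons, List.getLast?_eq_some_getLast (List.cons_ne_nil _ _)] at h1
        exact Option.some.inj h1
      have htail : pp :: tl = (pp :: tl).dropLast ++ [(t, kl)] := by
        conv_lhs => rw [← List.dropLast_append_getLast (List.cons_ne_nil pp tl)]
        rw [hg]
      have hkk : k1 + kl ≤ N := by
        have h1 : ((runsFrom t 1 ts).map Prod.snd).sum
            = k1 + ((((pp :: tl).dropLast).map Prod.snd).sum + kl) := by
          conv_lhs => rw [hr, htail]
          simp
        have h2 : 0 ≤ (((pp :: tl).dropLast).map Prod.snd).sum := by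
          apply List.sum_nonneg
          intro y hy
          obtain ⟨q, hq, rfl⟩ := List.mem_map.mp hy
          have hqmem : q ∈ runsFrom t 1 ts := by
            rw [hr]
            exact List.mem_cons_of_mem _ (List.dropLast_subset _ hq)
          exact le_trans zero_le_one (hpos q hqmem)
        rw [hsum] at h1
        omega
      rw [hA, hB, hR, if_pos (show 1 < (runsFrom t 1 ts).length ∧ t = t from ⟨hlen, rfl⟩)]
      have hcont : (List.foldl (fun d p => d.insert p.1 (max (d.getD p.1 0) p.2)) out0
          (runsFrom t 1 ts)).contains t = true := by
        rw [PySem.Dict.contains_iff_mem_keys, foldB_keys]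
        refine (PySem.Set.mem_update _ _ _).mpr (Or.inr ?_)
        rw [hr]
        exact List.mem_map_of_mem List.mem_cons_self
      apply items_ext
      · exact foldA_nodup _ _ _ out0_nodup
      · rw [PySem.Dict.keys_insert_of_contains _ _ hcont]
        exact foldB_nodup _ _ out0_nodup
      · -- keys agree
        rw [foldA_keys, PySem.Dict.keys_insert_of_contains _ _ hcont, foldB_keys]
        have h1 : ((runsFrom t 1 ts).dropLast ++ (t, k1 + kl) :: pp :: tl).map Prod.fst
            = ((runsFrom t 1 ts).dropLast.map Prod.fst ++ [t]) ++ (pp :: tl).map Prod.fst := by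
          simp
        have h2 : (runsFrom t 1 ts).map Prod.fst
            = (runsFrom t 1 ts).dropLast.map Prod.fst ++ [t] := by
          conv_lhs => rw [hsplit]
          simp
        rw [h1, PySem.Set.update_append, ← h2]
        apply update_absorb
        intro x hx
        obtain ⟨q, hq, rfl⟩ := List.mem_map.mp hx
        refine (PySem.Set.mem_update _ _ _).mpr (Or.inr ?_)
        refine List.mem_map_of_mem ?_
        rw [hr]
        exact List.mem_cons_of_mem _ hq
      · -- values agree
        intro x hx
        rw [foldA_getD, PySem.Dict.getD_insert, foldB_getD, foldB_getD]
        rw [val_merge x t k1 kl (out0.getD x 0) N (runsFrom t 1 ts).dropLast (pp :: tl)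
          (runsFrom t 1 ts) hr hsplit hle hkk hk1]
        by_cases hxt : x = t
        · subst hxt; simp
        · simp [hxt]
    · -- a single run: the whole list is one category
      have hlen1 : (runsFrom t 1 ts).length = 1 := by
        have := List.length_pos_of_ne_nil hne
        omega
      have htail : tail = [] := by
        have h1 := congrArg List.length hr
        rw [hlen1] at h1
        simp only [List.length_cons] at h1
        exact List.eq_nil_of_length_eq_zero (by omega)
      have hkl : kl = k1 := by
        rw [hr, htail] at hlast
        simp at hlast
        omega
      have hk1N : k1 = N := by
        rw [hr, htail] at hsum
        simpa using hsum
      have hdrop : (runsFrom t 1 ts).dropLast = [] := by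
        rw [hr, htail]
        rfl
      rw [hA, hB, hR, hdrop, htail,
        if_neg (show ¬ (1 < (runsFrom t 1 ts).length ∧ t = t) from fun h => hlen h.1)]
      apply items_ext
      · exact foldA_nodup _ _ _ out0_nodup
      · exact foldB_nodup _ _ out0_nodup
      · rw [foldA_keys, foldB_keys, hr, htail]
        simp
      · intro x hx
        rw [foldA_getD, foldB_getD, hr, htail]
        have h0 : (0 : Int) ≤ N := by rw [hN0]; positivity
        rw [hkl, hk1N]
        simpa using val_single x t N (out0.getD x 0) h0
  · -- first and last categories differ: runs of the doubled list are just r ++ r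
    have hR : runsFrom t 1 (ts ++ t :: ts)
        = runsFrom t 1 ts ++ runsFrom t 1 ts := by
      rw [hRdef, if_neg htc, ← hsplit]
    rw [hA, hB, hR, if_neg (show ¬ (1 < (runsFrom t 1 ts).length ∧ t = cl) from
      fun h => htc h.2)]
    apply items_ext
    · exact foldA_nodup _ _ _ out0_nodup
    · exact foldB_nodup _ _ out0_nodup
    · rw [foldA_keys, foldB_keys, List.map_append, PySem.Set.update_append]
      apply update_absorb
      intro x hx
      exact (PySem.Set.mem_update _ _ _).mpr (Or.inr hx)
    · intro x hx
      rw [foldA_getD, foldB_getD]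
      exact val_double x (out0.getD x 0) N (runsFrom t 1 ts) hle

-- ===== VERDICT (by name: the statement is the Claim_ definition above) =====
theorem self_run_max_py_spec : Claim_equal_self_run_max_py := by
  intro tokens _ _
  unfold Spec_self_run_max_py
  cases tokens with
  | nil => rfl
  | cons t ts => exact main_cons t ts
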